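-- pv_equiv track=rewrite | github.com/jjoshua2/arc_agi | unsolved/2025-10-09T03-37-17Z/d22278a0_best1.py | fill_line
-- ===== SOURCE A (Python) =====
-- def fill_line(w, r, color, is_normal):
--     leading = r + 1
--     line = [0] * w
--     if leading >= w:
--         if r % 2 == 0:
--             for i in range(w):
--                 line[i] = color
--         # else remains 0
--     else:
--         if r % 2 == 0:
--             # even: leading C, then repeat 0 C
--             for i in range(leading):
--                 line[i] = color
--             pos = leading
--             for j in range(w - leading):
--                 if j % 2 == 0:
--                     line[pos] = 0
--                 else:
--                     line[pos] = color
--                 pos += 1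
--         else:
--             # odd: leading 0, then repeat C 0
--             for i in range(leading):
--                 line[i] = 0
--             pos = leading
--             for j in range(w - leading):
--                 if j % 2 == 0:
--                     line[pos] = color
--                 else:
--                     line[pos] = 0
--                 pos += 1
--     if not is_normal:
--         line = line[::-1]
--     return line
-- ===== SOURCE B (Python) =====
-- def fill_line(w, r, color, is_normal):
--     # Stage 1: global checkerboard (color at even indices) — the tail pattern of every
--     # row sits exactly on the even global indices, independent of r.
--     line = [color if i % 2 == 0 else 0 for i in range(w)]
--     # Stage 2: splice a solid head over the first r+1 cells (color on even rows, 0 on odd).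
--     head = min(r + 1, w)
--     if head > 0:
--         line[:head] = [color if r % 2 == 0 else 0] * head
--     return line if is_normal else line[::-1]
-- ===== Notes on version B (the rewrite author's own statement) =====
-- stated objective: simpler
-- what changed: B builds the row in two stages — a fixed global checkerboard (color at even indices, independent of r) and then a slice-assignment splicing a solid block over the first r+1 cells — instead of A's three branch-dependent sequences of index-write loops, using the fact that the tail pattern of every row lands exactly on even global indices.
import Mathlib
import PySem

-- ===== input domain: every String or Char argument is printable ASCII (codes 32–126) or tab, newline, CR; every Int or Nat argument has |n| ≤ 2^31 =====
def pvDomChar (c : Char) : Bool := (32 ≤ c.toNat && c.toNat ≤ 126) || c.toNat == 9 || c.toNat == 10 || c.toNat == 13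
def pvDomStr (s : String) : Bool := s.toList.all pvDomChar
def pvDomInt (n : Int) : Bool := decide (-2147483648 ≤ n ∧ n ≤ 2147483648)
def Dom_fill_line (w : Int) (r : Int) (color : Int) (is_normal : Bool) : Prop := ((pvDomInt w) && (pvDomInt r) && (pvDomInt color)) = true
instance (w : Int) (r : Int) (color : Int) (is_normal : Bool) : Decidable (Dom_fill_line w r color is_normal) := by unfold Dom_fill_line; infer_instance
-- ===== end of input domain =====

-- B builds the row in two stages — a global checkerboard (color on even indices, independent
-- of r) followed by splicing a solid block over the first r+1 cells — instead of A's three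
-- branch-dependent index-write loops (objective: simpler); equivalence is about the return value.

-- ===== PORT A =====
-- literal port: [0]*w, then the three branches of index-assignment loops
-- (line[i] = v with a possibly negative index is PySem.List.pySetD, exact wherever A returns;
--  where the index is out of range Python raises IndexError — those inputs are outside Pre_).
def fill_line (w : Int) (r : Int) (color : Int) (is_normal : Bool) : List Int :=
  let leading := r + 1
  let line0 : List Int := List.replicate w.toNat 0
  let line :=
    if leading ≥ w then
      if PySem.Int.mod r 2 = 0 then
        (PySem.List.pyRange 0 w 1).foldl (fun l i => PySem.List.pySetD l i color) line0
      else line0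
    else
      if PySem.Int.mod r 2 = 0 then
        let l1 := (PySem.List.pyRange 0 leading 1).foldl (fun l i => PySem.List.pySetD l i color) line0
        ((PySem.List.pyRange 0 (w - leading) 1).foldl
          (fun (st : List Int × Int) j =>
            (PySem.List.pySetD st.1 st.2 (if PySem.Int.mod j 2 = 0 then 0 else color), st.2 + 1))
          (l1, leading)).1
      else
        let l1 := (PySem.List.pyRange 0 leading 1).foldl (fun l i => PySem.List.pySetD l i (0 : Int)) line0
        ((PySem.List.pyRange 0 (w - leading) 1).foldl
          (fun (st : List Int × Int) j =>
            (PySem.List.pySetD st.1 st.2 (if PySem.Int.mod j 2 = 0 then color else 0), st.2 + 1))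
          (l1, leading)).1
  if is_normal then line else line.reverse

-- ===== PORT B =====
-- literal port of Source B: checkerboard comprehension, then the slice-assignment
-- line[:head] = [c0]*head (head = min(r+1, w) ≤ len(line)) is replicate ++ drop.
def fill_line_alt (w : Int) (r : Int) (color : Int) (is_normal : Bool) : List Int :=
  let line := (PySem.List.pyRange 0 w 1).map (fun i => if PySem.Int.mod i 2 = 0 then color else 0)
  let head := min (r + 1) w
  let line2 :=
    if head > 0 then
      List.replicate head.toNat (if PySem.Int.mod r 2 = 0 then color else 0) ++ line.drop head.toNat
    else line
  if is_normal then line2 else line2.reverse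

-- ===== PRECONDITION & SPEC =====
-- Pre_ excludes exactly the inputs on which A raises IndexError: when r+1 < w, A writes at
-- position r+1 (and onwards) of a list of length max(w,0); that raises iff w ≤ 0 or r+1 < -w.
def Pre_fill_line (w : Int) (r : Int) (color : Int) (is_normal : Bool) : Prop :=
  w ≤ r + 1 ∨ (0 < w ∧ -w ≤ r + 1)
instance (w : Int) (r : Int) (color : Int) (is_normal : Bool) : Decidable (Pre_fill_line w r color is_normal) := by unfold Pre_fill_line; infer_instance
def pvWitness_fill_line : Int × Int × Int × Bool := (5, 1, 7, true)

def Spec_fill_line (w : Int) (r : Int) (color : Int) (is_normal : Bool) (out : List Int) : Prop := out = fill_line_alt w r color is_normal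
instance (w : Int) (r : Int) (color : Int) (is_normal : Bool) (out : List Int) : Decidable (Spec_fill_line w r color is_normal out) := by unfold Spec_fill_line; infer_instance

-- ===== CLAIM (what is proved, stated in full; the proofs are below) =====
def Claim_equal_fill_line : Prop := ∀ (w : Int) (r : Int) (color : Int) (is_normal : Bool), Dom_fill_line w r color is_normal → Pre_fill_line w r color is_normal → Spec_fill_line w r color is_normal (fill_line w r color is_normal)

-- ===== LEMMAS AND PROOFS =====

lemma pySetD_neg (xs : List Int) (p : Int) (v : Int) (h1 : -(xs.length:Int) ≤ p) (h2 : p < 0) :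
    PySem.List.pySetD xs p v = xs.set (p + xs.length).toNat v := by
  simp only [PySem.List.pySetD, PySem.List.pySet?, PySem.List.pyIdx?]
  rw [if_neg (by omega), if_pos h1]
  simp only [Option.map_some, Option.getD_some]
  congr 1
  omega
lemma getD_set (l : List Int) (k i : Nat) (v : Int) :
    (l.set k v).getD i 0 = if k = i ∧ k < l.length then v else l.getD i 0 := by
  simp only [List.getD_eq_getElem?_getD, List.getElem?_set]
  split_ifs with h1 h2 h3 <;> simp_all
  omega

lemma prefixRun (c : Int) (l : List Int) (m : Nat) :
    ((PySem.List.pyRange 0 (m : Int) 1).foldl (fun l i => PySem.List.pySetD l i c) l).length = l.length ∧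
    ∀ i : Nat, ((PySem.List.pyRange 0 (m : Int) 1).foldl (fun l i => PySem.List.pySetD l i c) l).getD i 0 =
      if (i : Int) < m ∧ i < l.length then c else l.getD i 0 := by
  induction m with
  | zero => simp [PySem.List.pyRange_one_eq_nil]
  | succ m ih =>
    have hsplit : PySem.List.pyRange 0 ((m : Int) + 1) 1 =
        PySem.List.pyRange 0 (m : Int) 1 ++ [(m : Int)] := by
      have := PySem.List.pyRange_one_succ_right (a := 0) (b := (m : Int)) (by omega)
      simpa using this
    have hc : ((m + 1 : Nat) : Int) = (m : Int) + 1 := by push_cast; ring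
    rw [hc, hsplit, List.foldl_append]
    obtain ⟨hlen, hget⟩ := ih
    simp only [List.foldl_cons, List.foldl_nil]
    rw [PySem.List.pySetD_natCast]
    constructor
    · simp [hlen]
    · intro i
      rw [getD_set, hget i, hlen]
      split_ifs <;> first | rfl | omega

lemma writeRun (vf : Int → Int) (l : List Int) (p0 : Int) (m : Nat)
    (h1 : -(l.length : Int) ≤ p0) (h2 : p0 + m ≤ (l.length : Int)) :
    ((PySem.List.pyRange 0 (m : Int) 1).foldl
        (fun (st : List Int × Int) j => (PySem.List.pySetD st.1 st.2 (vf j), st.2 + 1)) (l, p0)).2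
        = p0 + m ∧
    ((PySem.List.pyRange 0 (m : Int) 1).foldl
        (fun (st : List Int × Int) j => (PySem.List.pySetD st.1 st.2 (vf j), st.2 + 1)) (l, p0)).1.length
        = l.length ∧
    ∀ i : Nat, i < l.length →
      ((PySem.List.pyRange 0 (m : Int) 1).foldl
        (fun (st : List Int × Int) j => (PySem.List.pySetD st.1 st.2 (vf j), st.2 + 1)) (l, p0)).1.getD i 0
      = if p0 ≤ (i : Int) ∧ (i : Int) < p0 + m then vf (i - p0)
        else if p0 + l.length ≤ (i : Int) ∧ (i : Int) < p0 + l.length + m then vf ((i : Int) - p0 - l.length)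
        else l.getD i 0 := by
  induction m with
  | zero =>
    refine ⟨by simp [PySem.List.pyRange_one_eq_nil], by simp [PySem.List.pyRange_one_eq_nil], ?_⟩
    intro i hi
    simp [PySem.List.pyRange_one_eq_nil]
    split_ifs <;> first | rfl | omega
  | succ m ih =>
    have h2' : p0 + m ≤ (l.length : Int) := by push_cast at h2 ⊢; omega
    obtain ⟨hpos, hlen, hget⟩ := ih h2'
    have hc : ((m + 1 : Nat) : Int) = (m : Int) + 1 := by push_cast; ring
    have hsplit : PySem.List.pyRange 0 ((m : Int) + 1) 1 =
        PySem.List.pyRange 0 (m : Int) 1 ++ [(m : Int)] := by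
      simpa using PySem.List.pyRange_one_succ_right (a := 0) (b := (m : Int)) (by omega)
    rw [hc, hsplit, List.foldl_append]
    set res := (PySem.List.pyRange 0 (m : Int) 1).foldl
        (fun (st : List Int × Int) j => (PySem.List.pySetD st.1 st.2 (vf j), st.2 + 1)) (l, p0) with hres
    simp only [List.foldl_cons, List.foldl_nil]
    rw [hpos]
    by_cases hp : 0 ≤ p0 + (m : Int)
    · -- direct write at index (p0+m).toNat
      rw [PySem.List.pySetD_of_nonneg (h := hp)]
      refine ⟨by omega, by simp [hlen], ?_⟩
      intro i hi
      rw [getD_set, hlen, hget i hi]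
      have hk : ((p0 + (m : Int)).toNat : Int) = p0 + m := by omega
      push_cast at h2 ⊢
      split_ifs <;> first | rfl | (congr 1; omega)
    · -- negative position: wraps to p0 + m + length
      have hlen' : (res.1.length : Int) = (l.length : Int) := by rw [hlen]
      rw [pySetD_neg _ _ _ (by omega) (by omega)]
      refine ⟨by omega, by simp [hlen], ?_⟩
      intro i hi
      rw [getD_set, hlen, hget i hi]
      have hk : ((p0 + (m : Int) + res.1.length).toNat : Int) = p0 + m + l.length := by
        rw [hlen']; omega
      push_cast at h2 ⊢
      rw [hlen'] at hk
      split_ifs <;> first | rfl | (congr 1; omega)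

lemma ext_getD (l1 l2 : List Int) (h : l1.length = l2.length)
    (hg : ∀ i, i < l1.length → l1.getD i 0 = l2.getD i 0) : l1 = l2 := by
  apply List.ext_getElem h
  intro i hi1 hi2
  have := hg i hi1
  rwa [List.getD_eq_getElem?_getD, List.getD_eq_getElem?_getD,
    List.getElem?_eq_getElem hi1, List.getElem?_eq_getElem hi2] at this

lemma map_range_getD (w : Int) (f : Int → Int) (i : Nat) (hi : (i : Int) < w) :
    ((PySem.List.pyRange 0 w 1).map f).getD i 0 = f i := by
  have hlen : (PySem.List.pyRange 0 w 1).length = w.toNat := by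
    simpa using PySem.List.length_pyRange_one (a := 0) (b := w)
  have hi' : i < ((PySem.List.pyRange 0 w 1).map f).length := by simp [hlen]; omega
  rw [List.getD_eq_getElem?_getD, List.getElem?_eq_getElem hi']
  simp only [List.getElem_map, Option.getD_some]
  congr 1
  have hk : i < (PySem.List.pyRange 0 w 1).length := by omega
  have := PySem.List.getElem_pyRange_one (a := 0) (b := w) (k := i) (h := hk)
  simp only [this, zero_add]

lemma range_toNat (b : Int) : PySem.List.pyRange 0 b 1 = PySem.List.pyRange 0 ((b.toNat : Nat) : Int) 1 := by
  rcases (by omega : 0 ≤ b ∨ b < 0) with h | h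
  · rw [Int.toNat_of_nonneg h]
  · rw [PySem.List.pyRange_one_eq_nil (by omega), PySem.List.pyRange_one_eq_nil (by omega)]

lemma map_range_len (w : Int) (f : Int → Int) :
    ((PySem.List.pyRange 0 w 1).map f).length = w.toNat := by
  rw [List.length_map]
  simpa using PySem.List.length_pyRange_one (a := 0) (b := w)

-- the per-index value both programs realise at index i (0 ≤ i < w)
def cellVal (r color i : Int) : Int :=
  if i < r + 1 then if PySem.Int.mod r 2 = 0 then color else 0
  else if PySem.Int.mod (i - (r + 1)) 2 = if PySem.Int.mod r 2 = 0 then (1 : Int) else 0 then color else 0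

lemma core_eq (w r color : Int) (hpre : w ≤ r + 1 ∨ (0 < w ∧ -w ≤ r + 1)) :
    (if r + 1 ≥ w then
      if PySem.Int.mod r 2 = 0 then
        List.foldl (fun l i => PySem.List.pySetD l i color) (List.replicate w.toNat 0) (PySem.List.pyRange 0 w 1)
      else List.replicate w.toNat 0
    else
      if PySem.Int.mod r 2 = 0 then
        (List.foldl (fun st j => (PySem.List.pySetD st.1 st.2 (if PySem.Int.mod j 2 = 0 then 0 else color), st.2 + 1))
          (List.foldl (fun l i => PySem.List.pySetD l i color) (List.replicate w.toNat 0) (PySem.List.pyRange 0 (r + 1) 1), r + 1)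
          (PySem.List.pyRange 0 (w - (r + 1)) 1)).1
      else
        (List.foldl (fun st j => (PySem.List.pySetD st.1 st.2 (if PySem.Int.mod j 2 = 0 then color else 0), st.2 + 1))
          (List.foldl (fun l i => PySem.List.pySetD l i 0) (List.replicate w.toNat 0) (PySem.List.pyRange 0 (r + 1) 1), r + 1)
          (PySem.List.pyRange 0 (w - (r + 1)) 1)).1)
    = List.map (cellVal r color) (PySem.List.pyRange 0 w 1) := by
  unfold cellVal
  split_ifs with hbig heven heven2
  · -- leading ≥ w, even: fill everything with color
    conv_lhs => rw [range_toNat w]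
    obtain ⟨hlen, hget⟩ := prefixRun color (List.replicate w.toNat (0 : Int)) w.toNat
    apply ext_getD
    · rw [hlen, map_range_len, List.length_replicate]
    · intro i hi
      rw [hlen, List.length_replicate] at hi
      have hiw : (i : Int) < w := by omega
      rw [hget i, map_range_getD _ _ _ hiw, List.length_replicate]
      rw [if_pos ⟨by omega, hi⟩, if_pos (show (i : Int) < r + 1 by omega)]
  · -- leading ≥ w, odd: all zeros
    apply ext_getD
    · rw [map_range_len, List.length_replicate]
    · intro i hi
      rw [List.length_replicate] at hi
      have hiw : (i : Int) < w := by omega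
      rw [map_range_getD _ _ _ hiw, if_pos (show (i : Int) < r + 1 by omega)]
      simp
  · -- leading < w, even
    have hw : 0 < w ∧ -w ≤ r + 1 := by rcases hpre with h | h; omega; exact h
    obtain ⟨hw0, hwl⟩ := hw
    rw [range_toNat (r + 1), range_toNat (w - (r + 1))]
    obtain ⟨hlen1, hget1⟩ := prefixRun color (List.replicate w.toNat (0 : Int)) (r + 1).toNat
    set l1 := List.foldl (fun l i => PySem.List.pySetD l i color) (List.replicate w.toNat (0 : Int))
        (PySem.List.pyRange 0 (((r + 1).toNat : Nat) : Int) 1) with hl1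
    rw [List.length_replicate] at hlen1
    obtain ⟨_, hlen2, hget2⟩ := writeRun (fun j => if PySem.Int.mod j 2 = 0 then 0 else color) l1 (r + 1)
        (w - (r + 1)).toNat (by rw [hlen1]; omega) (by rw [hlen1]; omega)
    apply ext_getD
    · rw [hlen2, hlen1, map_range_len]
    · intro i hi
      rw [hlen2, hlen1] at hi
      have hiw : (i : Int) < w := by omega
      rw [hget2 i (by omega), map_range_getD _ _ _ hiw]
      by_cases hlead : (i : Int) < r + 1
      · rw [if_neg (by omega), if_neg (by rw [hlen1]; omega), if_pos hlead,
          hget1 i, List.length_replicate]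
        rw [if_pos ⟨by omega, by omega⟩]
      · rw [if_pos ⟨by omega, by omega⟩, if_neg hlead]
        have h0 : (0 : Int) ≤ PySem.Int.mod ((i : Int) - (r + 1)) 2 := PySem.Int.mod_nonneg _ (by omega)
        have h2 : PySem.Int.mod ((i : Int) - (r + 1)) 2 < 2 := PySem.Int.mod_lt _ (by omega)
        by_cases hm : PySem.Int.mod ((i : Int) - (r + 1)) 2 = 0
        · rw [if_pos hm, if_neg (by omega)]
        · rw [if_neg hm, if_pos (by omega)]
  · -- leading < w, odd
    have hw : 0 < w ∧ -w ≤ r + 1 := by rcases hpre with h | h; omega; exact h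
    obtain ⟨hw0, hwl⟩ := hw
    rw [range_toNat (r + 1), range_toNat (w - (r + 1))]
    obtain ⟨hlen1, hget1⟩ := prefixRun (0 : Int) (List.replicate w.toNat (0 : Int)) (r + 1).toNat
    set l1 := List.foldl (fun l i => PySem.List.pySetD l i (0 : Int)) (List.replicate w.toNat (0 : Int))
        (PySem.List.pyRange 0 (((r + 1).toNat : Nat) : Int) 1) with hl1
    rw [List.length_replicate] at hlen1
    obtain ⟨_, hlen2, hget2⟩ := writeRun (fun j => if PySem.Int.mod j 2 = 0 then color else 0) l1 (r + 1)
        (w - (r + 1)).toNat (by rw [hlen1]; omega) (by rw [hlen1]; omega)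
    apply ext_getD
    · rw [hlen2, hlen1, map_range_len]
    · intro i hi
      rw [hlen2, hlen1] at hi
      have hiw : (i : Int) < w := by omega
      rw [hget2 i (by omega), map_range_getD _ _ _ hiw]
      by_cases hlead : (i : Int) < r + 1
      · rw [if_neg (by omega), if_neg (by rw [hlen1]; omega), if_pos hlead,
          hget1 i, List.length_replicate]
        split_ifs <;> simp
      · rw [if_pos ⟨by omega, by omega⟩, if_neg hlead]

-- B's splice construction also realises cellVal at every index
lemma alt_core_eq (w r color : Int) :
    (if min (r + 1) w > 0 then
      List.replicate (min (r + 1) w).toNat (if PySem.Int.mod r 2 = 0 then color else 0) ++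
        ((PySem.List.pyRange 0 w 1).map (fun i => if PySem.Int.mod i 2 = 0 then color else 0)).drop (min (r + 1) w).toNat
    else (PySem.List.pyRange 0 w 1).map (fun i => if PySem.Int.mod i 2 = 0 then color else 0))
    = List.map (cellVal r color) (PySem.List.pyRange 0 w 1) := by
  have hm2 : ∀ x : Int, PySem.Int.mod x 2 = x % 2 := fun x => PySem.Int.mod_eq_emod_of_pos (by norm_num)
  have hcell : ∀ i : Nat, (i : Int) < w → ¬ ((i : Int) < r + 1) →
      cellVal r color i = if PySem.Int.mod (i : Int) 2 = 0 then color else 0 := by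
    intro i _ hge
    unfold cellVal
    rw [if_neg hge]
    simp only [hm2]
    split_ifs <;> first | rfl | omega
  by_cases hh : min (r + 1) w > 0
  · rw [if_pos hh]
    have hle : (min (r + 1) w).toNat ≤ w.toNat := by omega
    apply ext_getD
    · rw [List.length_append, List.length_replicate, List.length_drop, map_range_len, map_range_len]
      omega
    · intro i hi
      rw [List.length_append, List.length_replicate, List.length_drop, map_range_len] at hi
      have hiw : (i : Int) < w := by omega
      rw [map_range_getD _ _ _ hiw]
      by_cases hin : i < (min (r + 1) w).toNat
      · have hc : cellVal r color (i : Int) = if PySem.Int.mod r 2 = 0 then color else 0 := by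
          unfold cellVal
          rw [if_pos (show ((i : Nat) : Int) < r + 1 by omega)]
        rw [hc, List.getD_eq_getElem?_getD, List.getElem?_append_left (by simp [hin]),
          List.getElem?_replicate, if_pos hin]
        rfl
      · rw [List.getD_eq_getElem?_getD,
          List.getElem?_append_right (by simp; omega)]
        simp only [List.length_replicate, List.getElem?_drop]
        have harith : (min (r + 1) w).toNat + (i - (min (r + 1) w).toNat) = i := by omega
        rw [harith, ← List.getD_eq_getElem?_getD, map_range_getD _ _ _ hiw,
          hcell i hiw (by omega)]
  · rw [if_neg hh]
    apply ext_getD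
    · rw [map_range_len, map_range_len]
    · intro i hi
      rw [map_range_len] at hi
      have hiw : (i : Int) < w := by omega
      rw [map_range_getD _ _ _ hiw, map_range_getD _ _ _ hiw, hcell i hiw (by omega)]

-- ===== VERDICT (by name: the statement is the Claim_ definition above) =====
theorem fill_line_spec : Claim_equal_fill_line := by
  intro w r color is_normal _ hpre
  unfold Pre_fill_line at hpre
  unfold Spec_fill_line fill_line fill_line_alt
  simp only []
  rw [core_eq w r color hpre, alt_core_eq w r color]
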